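-- pv_equiv track=rewrite | github.com/soheshdoshi/Ds-Algo | Stack/Largest Rectangle in Histogram.py | left_iddex
-- ===== SOURCE A (Python) =====
-- def left_iddex(A,lenth):
--     left_i=[0]*lenth
--     stack=[0]
--     for i in range(1,lenth):
--         if A[stack[-1]]<A[i]:
--             left_i[i]=i-stack[-1]-1
--             stack.append(i)
--         else:
--             while stack and A[stack[-1]]>=A[i]:
--                 stack.pop()
--             if len(stack)<1:
--                 left_i[i]=i
--             else:
--                 left_i[i]=i-stack[-1]-1
--             stack.append(i)
--     return left_i
-- ===== SOURCE B (Python) =====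
-- def left_iddex(A, lenth):
--     # Jump-pointer previous-strictly-smaller array instead of an explicit stack.
--     P = []       # P[i] = index of previous element strictly smaller than A[i], or -1
--     left_i = []
--     for i in range(lenth):
--         j = i - 1
--         while j >= 0 and A[j] >= A[i]:
--             j = P[j]
--         P.append(j)
--         left_i.append(i - j - 1)
--     return left_i
-- ===== Notes on version B (the rewrite author's own statement) =====
-- stated objective: alternative
-- what changed: Replaces the explicit pop-stack with a jump-pointer array P of previous-strictly-smaller indices: for each i it follows links j = P[j] instead of popping a stack, and builds the result by appending instead of preallocating and in-place assignment.
import Mathlib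
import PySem

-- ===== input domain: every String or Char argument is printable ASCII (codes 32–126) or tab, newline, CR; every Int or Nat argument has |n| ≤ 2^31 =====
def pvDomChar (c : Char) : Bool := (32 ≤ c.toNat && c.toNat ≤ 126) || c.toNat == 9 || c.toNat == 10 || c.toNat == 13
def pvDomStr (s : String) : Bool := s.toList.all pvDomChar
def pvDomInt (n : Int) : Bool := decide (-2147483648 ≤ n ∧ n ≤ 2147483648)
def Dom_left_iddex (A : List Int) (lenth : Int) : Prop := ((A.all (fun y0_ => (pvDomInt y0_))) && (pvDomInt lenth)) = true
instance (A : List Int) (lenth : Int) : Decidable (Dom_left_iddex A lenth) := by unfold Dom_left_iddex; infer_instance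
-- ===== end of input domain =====

-- B replaces A's pop-stack with a jump-pointer array of previous-strictly-smaller indices
-- (an alternative algorithm of the same cost); equal return values proved on Pre_ below.

-- ===== PORT A =====
-- the inner 'while stack and A[stack[-1]] >= A[i]: stack.pop()' loop; stack is kept
-- top-first (Python's stack[-1] is the head here), so pop = tail
def pvPopWhile (A : List Int) (x : Int) : List Int → List Int
  | [] => []
  | t :: s => if PySem.List.pyGetD A t 0 ≥ x then pvPopWhile A x s else t :: s

def left_iddex (A : List Int) (lenth : Int) : List Int :=
  -- left_i = [0]*lenth ([] when lenth ≤ 0, as in Python)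
  let left0 : List Int := List.replicate lenth.toNat 0
  -- indexing A[...] is in range on Pre_ inputs; pyGetD's default is never consulted there
  let st := (PySem.List.pyRange 1 lenth 1).foldl
    (fun (st : List Int × List Int) i =>
      let left_i := st.1
      let stack := st.2
      let top := stack.headD 0   -- stack[-1]; stack is never empty at the loop head
      if PySem.List.pyGetD A top 0 < PySem.List.pyGetD A i 0 then
        (left_i.set i.toNat (i - top - 1), i :: stack)
      else
        let s := pvPopWhile A (PySem.List.pyGetD A i 0) stack
        match s with
        | [] => (left_i.set i.toNat i, i :: s)          -- len(stack) < 1 branch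
        | t :: _ => (left_i.set i.toNat (i - t - 1), i :: s))
    (left0, [0])
  st.1

-- ===== PORT B =====
-- the inner 'while j >= 0 and A[j] >= A[i]: j = P[j]' loop; the fuel only makes it
-- total (each jump strictly decreases j, so fuel i suffices — proved below)
def pvJump (A P : List Int) (x : Int) : Int → Nat → Int
  | j, 0 => j
  | j, f+1 =>
      if 0 ≤ j ∧ PySem.List.pyGetD A j 0 ≥ x then
        pvJump A P x (PySem.List.pyGetD P j 0) f
      else j

def left_iddex_alt (A : List Int) (lenth : Int) : List Int :=
  ((PySem.List.pyRange 0 lenth 1).foldl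
    (fun (st : List Int × List Int) i =>
      let j := pvJump A st.1 (PySem.List.pyGetD A i 0) (i - 1) i.toNat
      (st.1 ++ [j], st.2 ++ [i - j - 1]))
    ([], [])).2

-- ===== PRECONDITION & SPEC =====
-- Pre_ excludes exactly the inputs where Python A raises IndexError: lenth ≥ 2 with
-- fewer than lenth elements in A (B raises there too).
def Pre_left_iddex (A : List Int) (lenth : Int) : Prop :=
  lenth ≤ 1 ∨ lenth ≤ (A.length : Int)
instance (A : List Int) (lenth : Int) : Decidable (Pre_left_iddex A lenth) := by
  unfold Pre_left_iddex; infer_instance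
def pvWitness_left_iddex : List Int × Int := ([3, 1, 2], 3)

def Spec_left_iddex (A : List Int) (lenth : Int) (out : List Int) : Prop := out = left_iddex_alt A lenth
instance (A : List Int) (lenth : Int) (out : List Int) : Decidable (Spec_left_iddex A lenth out) := by unfold Spec_left_iddex; infer_instance

-- ===== CLAIM (what is proved, stated in full; the proofs are below) =====
def Claim_equal_left_iddex : Prop := ∀ (A : List Int) (lenth : Int), Dom_left_iddex A lenth → Pre_left_iddex A lenth → Spec_left_iddex A lenth (left_iddex A lenth)

-- ===== LEMMAS AND PROOFS =====

-- the linked list of indices reachable from j through P (the stack A maintains)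
def pvChain (P : List Int) : Int → Nat → List Int
  | _, 0 => []
  | j, f+1 => if 0 ≤ j then j :: pvChain P (PySem.List.pyGetD P j 0) f else []

-- every entry of P is in [-1, k)
def pvGood (P : List Int) : Prop :=
  ∀ k : Nat, k < P.length → -1 ≤ P.getD k 0 ∧ P.getD k 0 < (k : Int)

theorem pvChain_neg (P : List Int) (j : Int) (f : Nat) (hj : j < 0) :
    pvChain P j f = [] := by
  cases f with
  | zero => rfl
  | succ f => simp only [pvChain, if_neg (by omega : ¬ (0:Int) ≤ j)]

theorem pvGetD_lt (P : List Int) (j : Int) (h0 : 0 ≤ j) (hlen : j < (P.length : Int))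
    (hg : pvGood P) :
    -1 ≤ PySem.List.pyGetD P j 0 ∧ PySem.List.pyGetD P j 0 < j := by
  have hnat : j.toNat < P.length := by omega
  have := hg j.toNat hnat
  rw [PySem.List.pyGetD_eq_getElem P 0 h0 hlen]
  rw [List.getD_eq_getElem _ 0 hnat] at this
  omega

theorem pvChain_stable (P : List Int) (hg : pvGood P) :
    ∀ t : Nat, ∀ j : Int, ∀ f₁ f₂ : Nat, (j + 1).toNat = t → j < (P.length : Int) →
      t ≤ f₁ → t ≤ f₂ → pvChain P j f₁ = pvChain P j f₂ := by
  intro t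
  induction t using Nat.strong_induction_on with
  | _ t ih =>
    intro j f₁ f₂ ht hlen h1 h2
    by_cases hj : 0 ≤ j
    · have htpos : 1 ≤ t := by omega
      obtain ⟨g₁, rfl⟩ : ∃ g, f₁ = g + 1 := ⟨f₁ - 1, by omega⟩
      obtain ⟨g₂, rfl⟩ : ∃ g, f₂ = g + 1 := ⟨f₂ - 1, by omega⟩
      have hnext := pvGetD_lt P j hj hlen hg
      simp only [pvChain, if_pos hj]
      have := ih (PySem.List.pyGetD P j 0 + 1).toNat (by omega)
        (PySem.List.pyGetD P j 0) g₁ g₂ rfl (by omega) (by omega) (by omega)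
      rw [this]
    · rw [pvChain_neg P j _ (by omega), pvChain_neg P j _ (by omega)]

theorem pvChain_append (P : List Int) (v : Int) (hg : pvGood P) :
    ∀ f : Nat, ∀ j : Int, j < (P.length : Int) →
      pvChain (P ++ [v]) j f = pvChain P j f := by
  intro f
  induction f with
  | zero => intro j _; rfl
  | succ f ih =>
    intro j hlen
    by_cases hj : 0 ≤ j
    · have hget : PySem.List.pyGetD (P ++ [v]) j 0 = PySem.List.pyGetD P j 0 := by
        rw [PySem.List.pyGetD_eq_getElem P 0 hj hlen,
            PySem.List.pyGetD_eq_getElem (P ++ [v]) 0 hj (by simp; omega)]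
        exact List.getElem_append_left (by omega)
      have hnext := pvGetD_lt P j hj hlen hg
      simp only [pvChain, if_pos hj, hget]
      rw [ih (PySem.List.pyGetD P j 0) (by omega)]
    · rw [pvChain_neg _ j _ (by omega), pvChain_neg P j _ (by omega)]

theorem pvJump_bounds (A P : List Int) (x : Int) (hg : pvGood P) :
    ∀ f : Nat, ∀ j : Int, -1 ≤ j → j < (P.length : Int) →
      -1 ≤ pvJump A P x j f ∧ pvJump A P x j f ≤ j := by
  intro f
  induction f with
  | zero => intro j h1 _; exact ⟨h1, le_refl j⟩
  | succ f ih =>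
    intro j h1 hlen
    by_cases hc : 0 ≤ j ∧ PySem.List.pyGetD A j 0 ≥ x
    · have hnext := pvGetD_lt P j hc.1 hlen hg
      simp only [pvJump, if_pos hc]
      have := ih (PySem.List.pyGetD P j 0) hnext.1 (by omega)
      exact ⟨this.1, by omega⟩
    · simp only [pvJump, if_neg hc]; exact ⟨h1, le_refl j⟩

theorem pvPop_jump (A P : List Int) (x : Int) (hg : pvGood P) :
    ∀ f : Nat, ∀ j : Int, j < (P.length : Int) → (j + 1).toNat ≤ f →
      pvPopWhile A x (pvChain P j f) = pvChain P (pvJump A P x j f) f := by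
  intro f
  induction f with
  | zero =>
    intro j _ _
    simp [pvChain, pvPopWhile]
  | succ f ih =>
    intro j hlen hf
    by_cases hj : 0 ≤ j
    · simp only [pvChain, if_pos hj]
      have hnext := pvGetD_lt P j hj hlen hg
      by_cases hge : PySem.List.pyGetD A j 0 ≥ x
      · simp only [pvPopWhile, if_pos hge, pvJump, if_pos (And.intro hj hge)]
        rw [ih (PySem.List.pyGetD P j 0) (by omega) (by omega)]
        -- adjust fuel f → f+1 on the right using stability
        have hb := pvJump_bounds A P x hg f (PySem.List.pyGetD P j 0) hnext.1 (by omega)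
        exact pvChain_stable P hg (pvJump A P x (PySem.List.pyGetD P j 0) f + 1).toNat
          (pvJump A P x (PySem.List.pyGetD P j 0) f) f (f + 1) rfl (by omega)
          (by omega) (by omega)
      · simp only [pvPopWhile, if_neg hge]
        have : ¬ (0 ≤ j ∧ PySem.List.pyGetD A j 0 ≥ x) := by tauto
        simp only [pvJump, if_neg this]
        simp [if_pos hj]
    · rw [pvChain_neg P j _ (by omega)]
      have : ¬ (0 ≤ j ∧ PySem.List.pyGetD A j 0 ≥ x) := by tauto
      simp only [pvJump, if_neg this]
      simp [pvPopWhile, pvChain_neg P j _ (by omega)]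

-- the two fold step functions, named for the induction
def pvStepA (A : List Int) (st : List Int × List Int) (i : Int) : List Int × List Int :=
  let left_i := st.1
  let stack := st.2
  let top := stack.headD 0
  if PySem.List.pyGetD A top 0 < PySem.List.pyGetD A i 0 then
    (left_i.set i.toNat (i - top - 1), i :: stack)
  else
    let s := pvPopWhile A (PySem.List.pyGetD A i 0) stack
    match s with
    | [] => (left_i.set i.toNat i, i :: s)
    | t :: _ => (left_i.set i.toNat (i - t - 1), i :: s)

def pvStepB (A : List Int) (st : List Int × List Int) (i : Int) : List Int × List Int :=
  let j := pvJump A st.1 (PySem.List.pyGetD A i 0) (i - 1) i.toNat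
  (st.1 ++ [j], st.2 ++ [i - j - 1])

theorem left_iddex_eq_fold (A : List Int) (lenth : Int) :
    left_iddex A lenth =
      ((PySem.List.pyRange 1 lenth 1).foldl (pvStepA A)
        (List.replicate lenth.toNat 0, [0])).1 := rfl

theorem left_iddex_alt_eq_fold (A : List Int) (lenth : Int) :
    left_iddex_alt A lenth =
      ((PySem.List.pyRange 0 lenth 1).foldl (pvStepB A) ([], [])).2 := rfl

-- the coupled invariant after processing indices below m
theorem pvInvariant (A : List Int) (lenth : Int) (hn : 1 ≤ lenth) :
    ∀ m : Nat, 1 ≤ m → (m : Int) ≤ lenth →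
      let sB := (PySem.List.pyRange 0 (m : Int) 1).foldl (pvStepB A) ([], [])
      let sA := (PySem.List.pyRange 1 (m : Int) 1).foldl (pvStepA A)
        (List.replicate lenth.toNat 0, [0])
      sB.1.length = m ∧ sB.2.length = m ∧ pvGood sB.1 ∧
        sA.2 = pvChain sB.1 ((m : Int) - 1) m ∧
        sA.1 = sB.2 ++ List.replicate (lenth.toNat - m) 0 := by
  intro m
  induction m with
  | zero => intro h; omega
  | succ m ih =>
    intro _ hm
    by_cases hm1 : m = 0
    · subst hm1
      -- base case m = 1
      have h01 : PySem.List.pyRange 0 (1 : Int) 1 = [0] := by decide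
      have h11 : PySem.List.pyRange 1 (1 : Int) 1 = [] := by decide
      simp only [Nat.zero_add, Nat.cast_one]
      rw [h01, h11]
      have hB1 : List.foldl (pvStepB A) ([], []) [0]
          = ([(-1 : Int)], [(0 : Int)]) := by
        simp [pvStepB, pvJump]
      rw [hB1]
      refine ⟨rfl, rfl, ?_, ?_, ?_⟩
      · intro k hk
        have hk0 : k = 0 := by simp at hk; omega
        subst hk0
        simp [List.getD]
      · simp only [List.foldl_nil]
        simp [pvChain]
      · simp only [List.foldl_nil]
        have h1 : lenth.toNat = 1 + (lenth.toNat - 1) := by omega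
        rw [h1, List.replicate_add]
        simp
    · -- step case: m ≥ 1
      have hmi : (1 : Int) ≤ (m : Int) := by omega
      have hs := ih (by omega) (by push_cast at hm ⊢; omega)
      set sB := (PySem.List.pyRange 0 (m : Int) 1).foldl (pvStepB A) ([], []) with hsB
      set sA := (PySem.List.pyRange 1 (m : Int) 1).foldl (pvStepA A)
        (List.replicate lenth.toNat 0, [0]) with hsA
      obtain ⟨hPl, hLl, hg, hstack, hleft⟩ := hs
      have hr0 : PySem.List.pyRange 0 ((m : Int) + 1) 1
          = PySem.List.pyRange 0 (m : Int) 1 ++ [(m : Int)] :=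
        PySem.List.pyRange_one_succ_right (by omega)
      have hr1 : PySem.List.pyRange 1 ((m : Int) + 1) 1
          = PySem.List.pyRange 1 (m : Int) 1 ++ [(m : Int)] :=
        PySem.List.pyRange_one_succ_right (by omega)
      push_cast
      rw [hr0, hr1, List.foldl_append, List.foldl_append, ← hsB, ← hsA]
      simp only [List.foldl_cons, List.foldl_nil]
      -- analyse one step at i = m
      set x := PySem.List.pyGetD A (m : Int) 0 with hx
      set r := pvJump A sB.1 x ((m : Int) - 1) (m : Int).toNat with hr
      have htn : ((m : Int)).toNat = m := by omega
      have hrb : -1 ≤ r ∧ r ≤ (m : Int) - 1 := by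
        rw [hr, htn]
        exact pvJump_bounds A sB.1 x hg m ((m : Int) - 1) (by omega) (by omega)
      have hrlen : r < (sB.1.length : Int) := by rw [hPl]; omega
      -- B's step
      have hBstep : pvStepB A sB (m : Int) = (sB.1 ++ [r], sB.2 ++ [(m : Int) - r - 1]) := by
        simp only [pvStepB, ← hx, ← hr]
      -- the stack at the loop head is the chain from m-1
      have hchain1 : pvChain sB.1 ((m : Int) - 1) m
          = ((m : Int) - 1) :: pvChain sB.1 (PySem.List.pyGetD sB.1 ((m : Int) - 1) 0) (m - 1) := by
        obtain ⟨m', rfl⟩ : ∃ m', m = m' + 1 := ⟨m - 1, by omega⟩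
        simp only [pvChain]
        simp
      -- A's step produces value m - r - 1 and stack chain sB.1 r
      have hAstack : (pvStepA A sA (m : Int)).2 = (m : Int) :: pvChain sB.1 r m ∧
          (pvStepA A sA (m : Int)).1 = sA.1.set m ((m : Int) - r - 1) := by
        simp only [pvStepA]
        rw [hstack, hchain1]
        simp only [List.headD_cons]
        by_cases hlt : PySem.List.pyGetD A ((m : Int) - 1) 0 < PySem.List.pyGetD A (m : Int) 0
        · -- first branch: the jump also stops immediately at m-1
          have hreq : r = (m : Int) - 1 := by
            rw [hr, htn]
            obtain ⟨m', rfl⟩ : ∃ m', m = m' + 1 := ⟨m - 1, by omega⟩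
            simp only [pvJump]
            rw [if_neg (by rw [hx]; rintro ⟨-, hge⟩; exact absurd hlt (not_lt.mpr hge))]
          rw [if_pos hlt]
          constructor
          · rw [hreq, ← hchain1, htn]
          · rw [hreq, htn]
        · -- else branch: pop = jump
          rw [if_neg hlt]
          rw [← hchain1]
          have hpop : pvPopWhile A x (pvChain sB.1 ((m : Int) - 1) m) = pvChain sB.1 r m := by
            rw [hr, htn]
            exact pvPop_jump A sB.1 x hg m ((m : Int) - 1) (by rw [hPl]; omega) (by omega)
          rw [hpop]
          by_cases hrneg : r < 0
          · rw [pvChain_neg sB.1 r m hrneg]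
            refine ⟨rfl, ?_⟩
            rw [htn, show r = -1 from by omega]
            norm_num
          · have hchr : pvChain sB.1 r m = r :: pvChain sB.1 (PySem.List.pyGetD sB.1 r 0) (m - 1) := by
              obtain ⟨m', rfl⟩ : ∃ m', m = m' + 1 := ⟨m - 1, by omega⟩
              simp only [pvChain, if_pos (by omega : (0:Int) ≤ r)]
              simp
            rw [hchr, htn]
            exact ⟨rfl, rfl⟩
      refine ⟨?_, ?_, ?_, ?_, ?_⟩
      · rw [hBstep]; simp [hPl]
      · rw [hBstep]; simp [hLl]
      · -- goodness of P ++ [r]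
        rw [hBstep]
        intro k hk
        simp only [List.length_append, List.length_cons, List.length_nil, hPl] at hk
        by_cases hkm : k < m
        · have hgk := hg k (by omega : k < sB.1.length)
          rw [List.getD_append _ _ _ _ (by omega)]
          exact hgk
        · have hke : k = m := by omega
          subst hke
          rw [List.getD_eq_getElem _ 0 (by simp [hPl])]
          rw [List.getElem_append_right (by omega)]
          simp [hPl]
          omega
      · -- new stack = chain of new P from m
        rw [hBstep, hAstack.1]
        simp only []
        have : pvChain (sB.1 ++ [r]) (m : Int) (m + 1)
            = (m : Int) :: pvChain (sB.1 ++ [r]) (PySem.List.pyGetD (sB.1 ++ [r]) (m : Int) 0) m := by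
          simp only [pvChain, if_pos (by omega : (0:Int) ≤ (m:Int))]
        rw [show ((m:Int) + 1 - 1) = (m:Int) by ring]
        rw [show (m + 1 : Nat) = m + 1 from rfl, this]
        have hgetr : PySem.List.pyGetD (sB.1 ++ [r]) (m : Int) 0 = r := by
          rw [PySem.List.pyGetD_eq_getElem _ 0 (by omega) (by simp [hPl])]
          rw [List.getElem_append_right (by simp [hPl])]
          simp [hPl]
        rw [hgetr]
        -- new entries of P beyond r's reach do not matter
        have hgood' : pvGood sB.1 := hg
        rw [pvChain_append sB.1 r hgood' m r hrlen]
      · -- new left list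
        rw [hBstep, hAstack.2, hleft]
        simp only []
        have hsplit : List.replicate (lenth.toNat - m) (0 : Int)
            = 0 :: List.replicate (lenth.toNat - (m + 1)) 0 := by
          have : lenth.toNat - m = (lenth.toNat - (m + 1)) + 1 := by push_cast at hm; omega
          rw [this, List.replicate_succ]
        rw [hsplit]
        rw [show sB.2 ++ 0 :: List.replicate (lenth.toNat - (m + 1)) (0:Int)
              = sB.2 ++ [0] ++ List.replicate (lenth.toNat - (m + 1)) 0 by simp]
        rw [List.set_append]
        rw [if_pos (by simp [hLl])]
        rw [List.set_append]
        rw [if_neg (by rw [hLl]; omega)]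
        simp [hLl]

-- ===== VERDICT (by name: the statement is the Claim_ definition above) =====
theorem left_iddex_spec : Claim_equal_left_iddex := by
  intro A lenth _ _
  unfold Spec_left_iddex
  by_cases hn : lenth ≤ 0
  · rw [left_iddex_eq_fold, left_iddex_alt_eq_fold]
    rw [PySem.List.pyRange_one_eq_nil (by omega), PySem.List.pyRange_one_eq_nil (by omega)]
    simp
    omega
  · have h1 : 1 ≤ lenth := by omega
    have hcast : ((lenth.toNat : Int)) = lenth := by omega
    have := pvInvariant A lenth h1 lenth.toNat (by omega) (by omega)
    rw [hcast] at this
    obtain ⟨_, _, _, _, hleft⟩ := this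
    rw [left_iddex_eq_fold, left_iddex_alt_eq_fold, hleft]
    simp
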